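-- pv_equiv track=rewrite | github.com/pauline2k/boac | bea/test_utils/nessie_utils.py | _parse_meeting_days
-- ===== SOURCE A (Python) =====
-- def _parse_meeting_days(days_string):
--     if days_string:
--         converted_days = []
--         days_of_week = [(days_string[i:i + 2]) for i in range(0, len(days_string), 2)]
--         days_count = len(days_of_week)
--         for day in days_of_week:
--             if day == 'MO':
--                 converted_days.append('Monday' if days_count == 1 else 'Mon')
--             elif day == 'TU':
--                 converted_days.append('Tuesday' if days_count == 1 else 'Tue')
--             elif day == 'WE':
--                 converted_days.append('Wednesday' if days_count == 1 else 'Wed')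
--             elif day == 'TH':
--                 converted_days.append('Thursday' if days_count == 1 else 'Thu')
--             elif day == 'FR':
--                 converted_days.append('Friday' if days_count == 1 else 'Fri')
--             elif day == 'SA':
--                 converted_days.append('Saturday' if days_count == 1 else 'Sat')
--             else:
--                 converted_days.append('Sunday' if days_count == 1 else 'Sun')
--         converted_days = ', '.join(converted_days)
--     else:
--         converted_days = None
--     return converted_days
-- ===== SOURCE B (Python) =====
-- _FULL = {'MO': 'Monday', 'TU': 'Tuesday', 'WE': 'Wednesday',
--          'TH': 'Thursday', 'FR': 'Friday', 'SA': 'Saturday'}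
-- _ABBR = {'MO': 'Mon', 'TU': 'Tue', 'WE': 'Wed',
--          'TH': 'Thu', 'FR': 'Fri', 'SA': 'Sat'}
--
--
-- def _parse_meeting_days(days_string):
--     if not days_string:
--         return None
--     chunks = []
--     rest = days_string
--     while rest:
--         chunks.append(rest[:2])
--         rest = rest[2:]
--     if len(chunks) == 1:
--         return _FULL.get(chunks[0], 'Sunday')
--     return ', '.join(_ABBR.get(c, 'Sun') for c in chunks)
-- ===== Notes on version B (the rewrite author's own statement) =====
-- stated objective: simpler
-- what changed: Replaces the per-day 7-branch elif ladder (which re-decides days_count==1 inside the loop) with two lookup dicts with a Sunday/Sun default and a single top-level branch on whether there is exactly one chunk, chunking by peeling two characters off the front instead of a range/slice comprehension.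
import Mathlib
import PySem

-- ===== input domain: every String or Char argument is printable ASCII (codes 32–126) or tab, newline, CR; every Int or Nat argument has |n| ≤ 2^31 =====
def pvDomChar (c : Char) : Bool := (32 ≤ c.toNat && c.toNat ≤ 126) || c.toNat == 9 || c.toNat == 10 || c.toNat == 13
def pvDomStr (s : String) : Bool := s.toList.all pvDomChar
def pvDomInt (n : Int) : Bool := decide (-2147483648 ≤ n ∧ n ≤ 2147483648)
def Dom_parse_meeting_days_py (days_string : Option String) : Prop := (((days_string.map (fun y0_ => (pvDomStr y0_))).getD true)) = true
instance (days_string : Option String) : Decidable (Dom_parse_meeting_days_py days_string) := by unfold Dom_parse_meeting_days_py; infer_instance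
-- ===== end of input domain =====

-- B replaces A's in-loop 7-way elif ladder (re-deciding days_count == 1 per day) by two lookup
-- tables and one top-level branch on whether there is exactly one chunk (objective: simpler).

-- ===== PORT A =====
-- A's loop body: the elif ladder appending one name per day (days_count decides long/short form).
def pmdStepA (days_count : Nat) (acc : List String) (day : List Char) : List String :=
  if day = ['M', 'O'] then acc ++ [if days_count = 1 then "Monday" else "Mon"]
  else if day = ['T', 'U'] then acc ++ [if days_count = 1 then "Tuesday" else "Tue"]
  else if day = ['W', 'E'] then acc ++ [if days_count = 1 then "Wednesday" else "Wed"]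
  else if day = ['T', 'H'] then acc ++ [if days_count = 1 then "Thursday" else "Thu"]
  else if day = ['F', 'R'] then acc ++ [if days_count = 1 then "Friday" else "Fri"]
  else if day = ['S', 'A'] then acc ++ [if days_count = 1 then "Saturday" else "Sat"]
  else acc ++ [if days_count = 1 then "Sunday" else "Sun"]

def parse_meeting_days_py (days_string : Option String) : Option String :=
  match days_string with
  | none => none                                   -- 'if days_string:' — None is falsy
  | some s =>
    if s.toList = [] then none                     -- '' is falsy too
    else
      let days_of_week := (PySem.List.pyRange 0 (s.toList.length : Int) 2).map
        (fun i => PySem.List.slice s.toList (some i) (some (i + 2)))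
      let days_count := days_of_week.length
      let converted_days := days_of_week.foldl (pmdStepA days_count) []
      some (PySem.Str.join ", " converted_days)

-- ===== PORT B =====
-- B's while loop: peel rest[:2] off the front until the string is exhausted.
def pmdChunks : List Char → List (List Char)
  | [] => []
  | [c] => [[c]]
  | c1 :: c2 :: rest => [c1, c2] :: pmdChunks rest

-- _FULL and _ABBR: dicts as association lists; .get(key, default) = lookup + getD.
def pmdFull : List (List Char × String) :=
  [(['M', 'O'], "Monday"), (['T', 'U'], "Tuesday"), (['W', 'E'], "Wednesday"),
   (['T', 'H'], "Thursday"), (['F', 'R'], "Friday"), (['S', 'A'], "Saturday")]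

def pmdAbbr : List (List Char × String) :=
  [(['M', 'O'], "Mon"), (['T', 'U'], "Tue"), (['W', 'E'], "Wed"),
   (['T', 'H'], "Thu"), (['F', 'R'], "Fri"), (['S', 'A'], "Sat")]

def parse_meeting_days_py_alt (days_string : Option String) : Option String :=
  match days_string with
  | none => none                                   -- 'if not days_string: return None'
  | some s =>
    if s.toList = [] then none
    else
      let chunks := pmdChunks s.toList
      if chunks.length = 1 then
        some ((pmdFull.lookup chunks.headI).getD "Sunday")    -- _FULL.get(chunks[0], 'Sunday')
      else
        some (PySem.Str.join ", " (chunks.map (fun c => (pmdAbbr.lookup c).getD "Sun")))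

-- ===== PRECONDITION & SPEC =====
def Spec_parse_meeting_days_py (days_string : Option String) (out : Option String) : Prop := out = parse_meeting_days_py_alt days_string
instance (days_string : Option String) (out : Option String) : Decidable (Spec_parse_meeting_days_py days_string out) := by unfold Spec_parse_meeting_days_py; infer_instance

-- ===== CLAIM (what is proved, stated in full; the proofs are below) =====
def Claim_equal_parse_meeting_days_py : Prop := ∀ (days_string : Option String), Dom_parse_meeting_days_py days_string → Spec_parse_meeting_days_py days_string (parse_meeting_days_py days_string)

-- ===== LEMMAS AND PROOFS =====

-- A's elif ladder computes exactly B's dict lookup with default, long or short per days_count.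
lemma pmdStepA_eq (n : Nat) (acc : List String) (d : List Char) :
    pmdStepA n acc d =
      acc ++ [if n = 1 then (pmdFull.lookup d).getD "Sunday" else (pmdAbbr.lookup d).getD "Sun"] := by
  unfold pmdStepA pmdFull pmdAbbr
  split_ifs with h1 h2 h3 h4 h5 h6 <;>
    simp_all [List.lookup] <;>
    simp [show (d == ['M','O']) = false by simpa using ‹¬d = ['M','O']›,
          show (d == ['T','U']) = false by simpa using ‹¬d = ['T','U']›,
          show (d == ['W','E']) = false by simpa using ‹¬d = ['W','E']›,
          show (d == ['T','H']) = false by simpa using ‹¬d = ['T','H']›,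
          show (d == ['F','R']) = false by simpa using ‹¬d = ['F','R']›,
          show (d == ['S','A']) = false by simpa using ‹¬d = ['S','A']›]

-- xs[j:j+2] is take 2 of drop j.
lemma pmdSlice2 (xs : List Char) (j : Nat) :
    PySem.List.slice xs (some (j : Int)) (some ((j : Int) + 2)) = (xs.drop j).take 2 := by
  have := PySem.List.slice_natCast_add xs j 2
  simpa using this

-- A's slice-comprehension chunking equals B's peel-two-off-the-front chunking.
lemma pmdChunks_eq (l : List Char) :
    (PySem.List.pyRange 0 (l.length : Int) 2).map
      (fun i => PySem.List.slice l (some i) (some (i + 2))) = pmdChunks l := by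
  induction l using pmdChunks.induct with
  | case1 => simp [pmdChunks, PySem.List.pyRange_of_pos 0 0 (by norm_num : (0:Int) < 2)]
  | case2 c =>
    simp only [List.length_singleton, Nat.cast_one]
    rw [PySem.List.pyRange_of_pos 0 1 (by norm_num : (0:Int) < 2)]
    norm_num [pmdChunks]
    have := pmdSlice2 [c] 0
    simpa using this
  | case3 c1 c2 rest ih =>
    rw [PySem.List.pyRange_of_pos 0 _ (by norm_num : (0:Int) < 2)] at ih ⊢
    have hn : (0 : Int) ≤ (rest.length : Int) := by positivity
    have hcnt : (if (0:Int) < ((c1 :: c2 :: rest).length : Int)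
        then ((((c1 :: c2 :: rest).length : Int) - 0 + 2 - 1) / 2).toNat else 0)
        = (if (0:Int) < (rest.length : Int)
            then (((rest.length : Int) - 0 + 2 - 1) / 2).toNat else 0) + 1 := by
      simp only [List.length_cons]
      split_ifs <;> push_cast <;> omega
    rw [hcnt, List.range_succ_eq_map, List.map_cons, List.map_map]
    rw [show pmdChunks (c1 :: c2 :: rest) = [c1, c2] :: pmdChunks rest from rfl]
    rw [List.map_cons, List.map_map]
    simp only [List.cons.injEq]
    refine ⟨?_, ?_⟩
    · have := pmdSlice2 (c1 :: c2 :: rest) 0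
      simpa using this
    · rw [← ih, List.map_map]
      apply List.map_congr_left
      intro k _
      simp only [Function.comp]
      have h1 : (0 : Int) + 2 * ((Nat.succ k : Nat) : Int) = ((2 * k + 2 : Nat) : Int) := by
        push_cast; ring
      have h2 : (0 : Int) + 2 * ((k : Nat) : Int) = ((2 * k : Nat) : Int) := by push_cast; ring
      rw [h1, h2, pmdSlice2, pmdSlice2]
      rw [show (2 * k + 2) = (2 * k + 1) + 1 from rfl, List.drop_succ_cons, List.drop_succ_cons]

-- ===== VERDICT (by name: the statement is the Claim_ definition above) =====
theorem parse_meeting_days_py_spec : Claim_equal_parse_meeting_days_py := by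
  intro days_string _
  unfold Spec_parse_meeting_days_py
  cases days_string with
  | none => rfl
  | some s =>
    simp only [parse_meeting_days_py, parse_meeting_days_py_alt]
    by_cases hs : s.toList = []
    · simp [hs]
    · rw [if_neg hs, if_neg hs]
      rw [pmdChunks_eq]
      have hstep : ∀ n : Nat, pmdStepA n = (fun acc d =>
          acc ++ [if n = 1 then (pmdFull.lookup d).getD "Sunday"
                  else (pmdAbbr.lookup d).getD "Sun"]) := by
        intro n; funext acc d; exact pmdStepA_eq n acc d
      rw [hstep, PySem.List.foldl_append_singleton_eq_map, List.nil_append]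
      by_cases h1 : (pmdChunks s.toList).length = 1
      · obtain ⟨d, hd⟩ : ∃ d, pmdChunks s.toList = [d] := by
          match hm : pmdChunks s.toList with
          | [d] => exact ⟨d, rfl⟩
          | [] => rw [hm] at h1; simp at h1
          | _ :: _ :: _ => rw [hm] at h1; simp at h1
        rw [hd]
        simp only [List.length_singleton, List.map_singleton, List.headI]
        congr 1
        apply String.toList_inj.mp
        rw [PySem.Str.toList_join]
        simp [PySem.Chars.join_singleton]
      · simp only [if_neg h1]
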